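-- pv_equiv track=rewrite | github.com/langcog/childes-db | djangoapp/db/reader_utils.py | mlu_calc_components
-- ===== SOURCE A (Python) =====
-- def mlu_calc_components(sents):
--     results = []
--     lastSent = []
--     numFillers = 0
--     sentDiscount = 0
--     for sent in sents:
--         posList = [pos for (word,pos) in sent]
--         # if any part of the sentence is intelligible
--         if any(pos == 'unk' for pos in posList):
--             next
--         # if the sentence is null
--         elif sent == []:
--             next
--         # if the sentence is the same as the last sent
--         elif sent == lastSent:
--             next
--         else:
--             results.append([word for (word,pos) in sent])
--             # count number of fillers
--             if len(set(['co',None]).intersection(posList)) > 0: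
--                 numFillers += posList.count('co')
--                 numFillers += posList.count(None)
--                 sentDiscount += 1
--             lastSent = sent
--     return results, lastSent, numFillers, sentDiscount
-- ===== SOURCE B (Python) =====
-- def mlu_calc_components(sents):
--     # Backward scan: walk the sentences in reverse, keeping a one-element
--     # lookbehind ('pending'); a surviving sentence is kept exactly when the
--     # previous surviving sentence differs, so we emit 'pending' on seeing a
--     # different survivor and always keep the first survivor at the end.
--     kept_rev = []
--     pending = None
--     for s in reversed(sents):
--         if not s or any(pos == 'unk' for _, pos in s):
--             continue
--         if pending is not None and s != pending:
--             kept_rev.append(pending)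
--         pending = s
--     if pending is not None:
--         kept_rev.append(pending)
--     results = []
--     lastSent = kept_rev[0] if kept_rev else []
--     numFillers = 0
--     sentDiscount = 0
--     for s in kept_rev:
--         results.append([w for w, _ in s])
--         c = sum(1 for _, pos in s if pos == 'co' or pos is None)
--         numFillers += c
--         sentDiscount += bool(c)
--     results.reverse()
--     return results, lastSent, numFillers, sentDiscount
-- ===== Notes on version B (the rewrite author's own statement) =====
-- stated objective: alternative
-- what changed: A's forward loop carrying the last accepted sentence is replaced by a reverse traversal with a one-element lookbehind that decides keeps by comparing each survivor with the next one seen, building the kept list back-to-front, then a second pass over it derives words and filler tallies and the word lists are reversed into order.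
import Mathlib
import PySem

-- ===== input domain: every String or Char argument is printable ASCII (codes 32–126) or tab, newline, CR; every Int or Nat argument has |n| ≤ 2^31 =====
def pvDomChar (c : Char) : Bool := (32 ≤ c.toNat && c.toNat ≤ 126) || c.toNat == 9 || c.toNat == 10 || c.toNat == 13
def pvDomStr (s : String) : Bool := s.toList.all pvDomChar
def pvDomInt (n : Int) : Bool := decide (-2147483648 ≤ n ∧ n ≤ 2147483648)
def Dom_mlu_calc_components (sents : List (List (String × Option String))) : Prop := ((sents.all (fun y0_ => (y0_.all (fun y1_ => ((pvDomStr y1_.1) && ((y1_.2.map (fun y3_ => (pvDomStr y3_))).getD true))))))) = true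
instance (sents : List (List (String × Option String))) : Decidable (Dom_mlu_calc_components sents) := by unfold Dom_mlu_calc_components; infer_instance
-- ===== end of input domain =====

-- B replaces A's forward stateful loop by a reverse traversal with a one-element lookbehind
-- that builds the kept list back-to-front, plus a second pass for words/tallies (alternative, same cost).


-- ===== PORT A =====
-- loop body of A's for-loop, on the state (results, lastSent, numFillers, sentDiscount)
def pvStepA (st : List (List String) × List (String × Option String) × Int × Int)
    (sent : List (String × Option String)) :
    List (List String) × List (String × Option String) × Int × Int :=
  let posList := sent.map (fun wp => wp.2)
  if posList.any (fun pos => pos == some "unk") then st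
  else if sent = [] then st
  else if sent = st.2.1 then st
  else
    let results := st.1 ++ [sent.map (fun wp => wp.1)]
    -- len(set(['co', None]).intersection(posList)) > 0, via PySem.Set (exact)
    if 0 < PySem.Set.len (PySem.Set.inter (PySem.Set.ofList [some "co", (none : Option String)]) posList) then
      (results, sent,
        st.2.2.1 + (PySem.List.count posList (some "co") : Int) + (PySem.List.count posList (none : Option String) : Int),
        st.2.2.2 + 1)
    else (results, sent, st.2.2.1, st.2.2.2)

def mlu_calc_components (sents : List (List (String × Option String))) : List (List String) × (List (String × Option String)) × Int × Int :=
  sents.foldl pvStepA ([], [], 0, 0)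

-- ===== PORT B =====
-- c = sum(1 for _, pos in s if pos == 'co' or pos is None)
def pvFillB (s : List (String × Option String)) : Int :=
  (s.countP (fun wp => wp.2 == some "co" || wp.2.isNone) : Int)

-- body of Source B's backward scan, on the state (kept_rev, pending)
def pvBackB (st : List (List (String × Option String)) × Option (List (String × Option String)))
    (s : List (String × Option String)) :
    List (List (String × Option String)) × Option (List (String × Option String)) :=
  if s = [] ∨ s.any (fun wp => wp.2 == some "unk") = true then st
  else
    (match st.2 with
      | some p => if s ≠ p then st.1 ++ [p] else st.1
      | none => st.1,
     some s)

-- body of Source B's second loop, on the state (results, numFillers, sentDiscount)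
def pvLoopB (st : List (List String) × Int × Int) (s : List (String × Option String)) :
    List (List String) × Int × Int :=
  (st.1 ++ [s.map (fun wp => wp.1)], st.2.1 + pvFillB s,
   st.2.2 + if pvFillB s ≠ 0 then 1 else 0)

def mlu_calc_components_alt (sents : List (List (String × Option String))) : List (List String) × (List (String × Option String)) × Int × Int :=
  let f := sents.reverse.foldl pvBackB ([], none)
  let kept_rev := match f.2 with
    | some p => f.1 ++ [p]
    | none => f.1
  let lastSent := kept_rev.headD []
  let t := kept_rev.foldl pvLoopB ([], 0, 0)
  (t.1.reverse, lastSent, t.2.1, t.2.2)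

-- ===== PRECONDITION & SPEC =====
def Spec_mlu_calc_components (sents : List (List (String × Option String))) (out : List (List String) × (List (String × Option String)) × Int × Int) : Prop := out = mlu_calc_components_alt sents
instance (sents : List (List (String × Option String))) (out : List (List String) × (List (String × Option String)) × Int × Int) : Decidable (Spec_mlu_calc_components sents out) := by unfold Spec_mlu_calc_components; infer_instance

-- ===== CLAIM (what is proved, stated in full; the proofs are below) =====
def Claim_equal_mlu_calc_components : Prop := ∀ (sents : List (List (String × Option String))), Dom_mlu_calc_components sents → Spec_mlu_calc_components sents (mlu_calc_components sents)

-- ===== LEMMAS AND PROOFS =====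

-- a sentence survives A's (and B's) skip tests
def pvOk (s : List (String × Option String)) : Bool :=
  decide (s ≠ []) && !(s.any (fun wp => wp.2 == some "unk"))

-- the unconditional 'else' branch of A's loop body
def pvAccept (st : List (List String) × List (String × Option String) × Int × Int)
    (sent : List (String × Option String)) :
    List (List String) × List (String × Option String) × Int × Int :=
  if 0 < PySem.Set.len (PySem.Set.inter (PySem.Set.ofList [some "co", (none : Option String)]) (sent.map (fun wp => wp.2))) then
    (st.1 ++ [sent.map (fun wp => wp.1)], sent,
      st.2.2.1 + (PySem.List.count (sent.map (fun wp => wp.2)) (some "co") : Int) + (PySem.List.count (sent.map (fun wp => wp.2)) (none : Option String) : Int),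
      st.2.2.2 + 1)
  else (st.1 ++ [sent.map (fun wp => wp.1)], sent, st.2.2.1, st.2.2.2)

-- A's counter update, isolated
def pvTally (acc : Int × Int) (s : List (String × Option String)) : Int × Int :=
  if pvFillB s ≠ 0 then (acc.1 + pvFillB s, acc.2 + 1) else acc

-- collapse runs of equal adjacent elements, dropping a leading run equal to the option prev
def pvCol (q : Option (List (String × Option String))) :
    List (List (String × Option String)) → List (List (String × Option String))
  | [] => []
  | x :: t => if some x = q then pvCol q t else x :: pvCol (some x) t

def pvDisc (s : List (String × Option String)) : Int := if pvFillB s ≠ 0 then 1 else 0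

lemma stepA_skip (st : List (List String) × List (String × Option String) × Int × Int)
    (s : List (String × Option String)) (h : pvOk s = false) : pvStepA st s = st := by
  by_cases hs : s = []
  · subst hs; simp [pvStepA]
  · have hu : s.any (fun wp => wp.2 == some "unk") = true := by
      unfold pvOk at h
      rcases Bool.and_eq_false_iff.mp h with h1 | h1
      · exact absurd hs (by simpa using h1)
      · simpa using h1
    simp only [pvStepA, List.any_map]
    rw [if_pos (by simpa [Function.comp] using hu)]

lemma stepA_self (st : List (List String) × List (String × Option String) × Int × Int)
    (s : List (String × Option String)) (h : s = st.2.1) : pvStepA st s = st := by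
  simp only [pvStepA]
  split_ifs <;> simp_all

lemma stepA_accept (st : List (List String) × List (String × Option String) × Int × Int)
    (s : List (String × Option String)) (h : pvOk s = true) (hne : s ≠ st.2.1) :
    pvStepA st s = pvAccept st s := by
  unfold pvOk at h
  simp only [Bool.and_eq_true, decide_eq_true_eq, Bool.not_eq_true'] at h
  simp only [pvStepA, pvAccept, List.any_map]
  rw [if_neg (by simpa [Function.comp] using (by simp [h.2] : ¬ s.any (fun wp => wp.2 == some "unk") = true)),
    if_neg h.1, if_neg hne]

lemma accept_snd (st : List (List String) × List (String × Option String) × Int × Int)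
    (s : List (String × Option String)) : (pvAccept st s).2.1 = s := by
  simp only [pvAccept]
  split_ifs <;> rfl

lemma accept_fst (st : List (List String) × List (String × Option String) × Int × Int)
    (s : List (String × Option String)) : (pvAccept st s).1 = st.1 ++ [s.map (fun wp => wp.1)] := by
  simp only [pvAccept]
  split_ifs <;> rfl

-- A's loop = the unconditional loop over the collapsed filtered list
lemma foldA_eq (sents : List (List (String × Option String)))
    (st : List (List String) × List (String × Option String) × Int × Int)
    (hst : st.2.1 = [] ∨ pvOk st.2.1 = true) :
    sents.foldl pvStepA st =
      (pvCol (if st.2.1 = [] then none else some st.2.1) (sents.filter pvOk)).foldl pvAccept st := by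
  induction sents generalizing st with
  | nil => rfl
  | cons s ss ih =>
    by_cases h : pvOk s = true
    · simp only [List.foldl_cons, List.filter_cons_of_pos h]
      have hsne : s ≠ [] := by
        have h' := h
        unfold pvOk at h'
        simp only [Bool.and_eq_true, decide_eq_true_eq] at h'
        exact h'.1
      by_cases he : s = st.2.1
      · have hne : ¬ st.2.1 = [] := fun h0 => hsne (h0 ▸ he)
        rw [stepA_self st s he, pvCol, if_pos (by rw [if_neg hne, he]), ih st hst, if_neg hne]
      · have hq : ¬ some s = (if st.2.1 = [] then none else some st.2.1) := by
          split_ifs <;> simp [he]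
        rw [stepA_accept st s h he, pvCol, if_neg hq, List.foldl_cons]
        have hih := ih (pvAccept st s) (Or.inr (by rw [accept_snd]; exact h))
        rw [accept_snd] at hih
        rw [hih, if_neg hsne]
    · rw [List.foldl_cons, stepA_skip st s (by simpa using h), ih st hst,
        List.filter_cons_of_neg (by simpa using h)]

-- the intersection test of A ⟺ membership
lemma inter_len_pos (pos : List (Option String)) :
    (0 < PySem.Set.len (PySem.Set.inter (PySem.Set.ofList [some "co", (none : Option String)]) pos)) ↔
      (some "co" ∈ pos ∨ (none : Option String) ∈ pos) := by
  constructor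
  · intro h
    rcases List.exists_mem_of_length_pos (by simpa [PySem.Set.len] using h) with ⟨x, hx⟩
    have hx2 := (PySem.Set.mem_inter _ _ _).1 hx
    have : x ∈ [some "co", (none : Option String)] := by
      simpa using (PySem.Set.mem_ofList _ _).1 hx2.1
    have hx3 : x = some "co" ∨ x = (none : Option String) := by simpa using this
    rcases hx3 with rfl | rfl
    · exact Or.inl hx2.2
    · exact Or.inr hx2.2
  · intro h
    have : ∃ x, x ∈ PySem.Set.inter (PySem.Set.ofList [some "co", (none : Option String)]) pos := by
      rcases h with h | h
      · exact ⟨some "co", (PySem.Set.mem_inter _ _ _).2 ⟨(PySem.Set.mem_ofList _ _).2 (by simp), h⟩⟩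
      · exact ⟨none, (PySem.Set.mem_inter _ _ _).2 ⟨(PySem.Set.mem_ofList _ _).2 (by simp), h⟩⟩
    rcases this with ⟨x, hx⟩
    simpa [PySem.Set.len] using List.length_pos_of_mem hx

-- count 'co' + count None = count of (co-or-None), over the pair list
lemma count_co_none (s : List (String × Option String)) :
    (PySem.List.count (s.map (fun wp => wp.2)) (some "co") : Int) +
        (PySem.List.count (s.map (fun wp => wp.2)) (none : Option String) : Int) =
      (s.countP (fun wp => wp.2 == some "co" || wp.2.isNone) : Int) := by
  have key : ∀ (l : List (String × Option String)),
      (l.map (fun wp => wp.2)).count (some "co") + (l.map (fun wp => wp.2)).count (none : Option String) =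
        l.countP (fun wp => wp.2 == some "co" || wp.2.isNone) := by
    intro l
    induction l with
    | nil => rfl
    | cons wp t ih =>
      rcases wp with ⟨w, po⟩
      cases po with
      | none => simp; omega
      | some v =>
        by_cases hv : v = "co"
        · subst hv; simp; omega
        · simp [hv, ih]
  rw [PySem.List.count_eq, PySem.List.count_eq]
  push_cast [← key]
  ring

lemma accept_tally (st : List (List String) × List (String × Option String) × Int × Int)
    (s : List (String × Option String)) : (pvAccept st s).2.2 = pvTally st.2.2 s := by
  simp only [pvAccept, pvTally, pvFillB]
  by_cases h : (some "co" ∈ s.map (fun wp => wp.2) ∨ (none : Option String) ∈ s.map (fun wp => wp.2))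
  · rw [if_pos ((inter_len_pos _).2 h)]
    have hp : s.countP (fun wp => wp.2 == some "co" || wp.2.isNone) ≠ 0 := by
      intro h0
      have hall := List.countP_eq_zero.1 h0
      rcases h with h | h <;> rcases List.mem_map.1 h with ⟨wp, hwp, hv⟩ <;>
        exact absurd (hall wp hwp) (by simp [← hv])
    have hne : (s.countP (fun wp => wp.2 == some "co" || wp.2.isNone) : Int) ≠ 0 := by
      exact_mod_cast hp
    rw [if_pos hne]
    dsimp only
    refine Prod.ext ?_ rfl
    rw [add_assoc, count_co_none]
  · rw [if_neg (fun hp => h ((inter_len_pos _).1 hp))]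
    have h0 : s.countP (fun wp => wp.2 == some "co" || wp.2.isNone) = 0 := by
      rw [List.countP_eq_zero]
      rintro ⟨w, po⟩ hwp
      simp only [Bool.or_eq_true, beq_iff_eq, Option.isNone_iff_eq_none]
      rintro (hc | hc) <;> subst hc
      · exact h (Or.inl (List.mem_map.2 ⟨(w, some "co"), hwp, rfl⟩))
      · exact h (Or.inr (List.mem_map.2 ⟨(w, none), hwp, rfl⟩))
    rw [if_neg (by simp [h0])]

-- component-wise characterisation of the unconditional loop
lemma foldAccept_fst (k : List (List (String × Option String)))
    (st : List (List String) × List (String × Option String) × Int × Int) :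
    (k.foldl pvAccept st).1 = st.1 ++ k.map (fun s => s.map (fun wp => wp.1)) := by
  induction k generalizing st with
  | nil => simp
  | cons s t ih => simp [List.foldl_cons, ih, accept_fst]

lemma foldAccept_last (k : List (List (String × Option String)))
    (st : List (List String) × List (String × Option String) × Int × Int) :
    (k.foldl pvAccept st).2.1 = k.getLastD st.2.1 := by
  induction k generalizing st with
  | nil => rfl
  | cons s t ih =>
    rw [List.foldl_cons, ih, accept_snd, List.getLastD_cons]

lemma foldAccept_tally (k : List (List (String × Option String)))
    (st : List (List String) × List (String × Option String) × Int × Int) :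
    (k.foldl pvAccept st).2.2 = k.foldl pvTally st.2.2 := by
  induction k generalizing st with
  | nil => rfl
  | cons s t ih => rw [List.foldl_cons, List.foldl_cons, ih, accept_tally]

-- A's counter loop computes the two sums
lemma tally_sum (k : List (List (String × Option String))) (a b : Int) :
    k.foldl pvTally (a, b) = (a + (k.map pvFillB).sum, b + (k.map pvDisc).sum) := by
  induction k generalizing a b with
  | nil => simp
  | cons s t ih =>
    rw [List.foldl_cons]
    by_cases h : pvFillB s ≠ 0
    · rw [show pvTally (a, b) s = (a + pvFillB s, b + 1) from by simp [pvTally, h], ih]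
      simp [pvDisc, h]; constructor <;> ring
    · have h0 : pvFillB s = 0 := not_not.mp h
      rw [show pvTally (a, b) s = (a, b) from by simp [pvTally, h0], ih]
      simp [pvDisc, h0]

-- ===== B-side lemmas =====

-- B's skip guard is ¬ pvOk
lemma guard_iff (s : List (String × Option String)) :
    (s = [] ∨ s.any (fun wp => wp.2 == some "unk") = true) ↔ pvOk s = false := by
  unfold pvOk
  constructor
  · rintro (h | h) <;> simp [h]
  · intro h
    rcases Bool.and_eq_false_iff.mp h with h1 | h1
    · left; simpa using h1
    · right; simpa using h1

-- invariant of the backward scan (as a foldr): state = (drop-first-of-kept reversed, head of kept)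
lemma back_invariant (l : List (List (String × Option String))) :
    l.foldr (fun s st => pvBackB st s) ([], none) =
      (((pvCol none (l.filter pvOk)).drop 1).reverse, (pvCol none (l.filter pvOk)).head?) := by
  induction l with
  | nil => rfl
  | cons x t ih =>
    rw [List.foldr_cons, ih]
    by_cases hx : pvOk x = true
    · have hguard : ¬ (x = [] ∨ x.any (fun wp => wp.2 == some "unk") = true) := by
        rw [guard_iff]; simp [hx]
      rw [List.filter_cons_of_pos hx]
      cases hkt : (t.filter pvOk) with
      | nil =>
        simp only [pvBackB, if_neg hguard]
        simp [pvCol]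
      | cons p rest =>
        have hKt : pvCol none (p :: rest) = p :: pvCol (some p) rest := by
          simp [pvCol]
        by_cases hxp : x = p
        · subst hxp
          simp only [pvBackB, if_neg hguard, hKt]
          simp [pvCol]
        · have hpx : ¬ p = x := fun hh => hxp hh.symm
          simp only [pvBackB, if_neg hguard, hKt]
          have hcol : pvCol none (x :: p :: rest) = x :: p :: pvCol (some p) rest := by
            simp [pvCol, hpx]
          rw [hcol]
          simp [hxp]
    · rw [List.filter_cons_of_neg (by simpa using hx)]
      have hguard : x = [] ∨ x.any (fun wp => wp.2 == some "unk") = true := by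
        rw [guard_iff]; simpa using hx
      simp [pvBackB, if_pos hguard]

-- B's second loop computes words, the filler sum and the discount sum
lemma loopB_sum (k : List (List (String × Option String)))
    (res : List (List String)) (a b : Int) :
    k.foldl pvLoopB (res, a, b) =
      (res ++ k.map (fun s => s.map (fun wp => wp.1)),
        a + (k.map pvFillB).sum, b + (k.map pvDisc).sum) := by
  induction k generalizing res a b with
  | nil => simp
  | cons s t ih =>
    rw [List.foldl_cons, show pvLoopB (res, a, b) s =
      (res ++ [s.map (fun wp => wp.1)], a + pvFillB s, b + pvDisc s) from rfl, ih]
    simp [pvDisc]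
    constructor
    · ring
    · split_ifs <;> ring

lemma main_eq (sents : List (List (String × Option String))) :
    mlu_calc_components sents = mlu_calc_components_alt sents := by
  unfold mlu_calc_components mlu_calc_components_alt
  rw [List.foldl_reverse, back_invariant]
  have hA0 : sents.foldl pvStepA ([], [], 0, 0) =
      (pvCol none (sents.filter pvOk)).foldl pvAccept ([], [], 0, 0) := by
    simpa using foldA_eq sents ([], [], 0, 0) (Or.inl rfl)
  rw [hA0]
  set K := pvCol none (sents.filter pvOk) with hK
  have hA : (K.foldl pvAccept ([], [], 0, 0)).1 = K.map (fun s => s.map (fun wp => wp.1)) := by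
    simpa using foldAccept_fst K ([], [], 0, 0)
  have hA2 : (K.foldl pvAccept ([], [], 0, 0)).2.1 = K.getLastD [] := foldAccept_last K _
  have hA3 : (K.foldl pvAccept ([], [], 0, 0)).2.2 =
      ((K.map pvFillB).sum, (K.map pvDisc).sum) := by
    rw [foldAccept_tally, show (([], [], 0, 0) :
      List (List String) × List (String × Option String) × Int × Int).2.2 = ((0 : Int), (0 : Int)) from rfl,
      tally_sum]
    simp
  -- the B side, with kept_rev = K.reverse
  have hkrev : (match (((K.drop 1).reverse, K.head?) :
      List (List (String × Option String)) × Option (List (String × Option String))).2 with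
      | some p => (((K.drop 1).reverse, K.head?).1 ++ [p])
      | none => (((K.drop 1).reverse, K.head?).1)) = K.reverse := by
    cases K with
    | nil => rfl
    | cons k r => simp
  dsimp only
  rw [hkrev]
  rw [loopB_sum K.reverse [] 0 0]
  refine Prod.ext ?_ (Prod.ext ?_ ?_)
  · rw [hA]
    simp [List.map_reverse]
  · rw [hA2]
    cases hKc : K with
    | nil => rfl
    | cons k r =>
      rw [show (k :: r).reverse.headD [] = ((k :: r).reverse.head?).getD [] from by
        cases h : (k :: r).reverse <;> simp_all]
      rw [List.head?_reverse]
      rw [List.getLastD_eq_getLast?]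
  · rw [hA3]
    simp [List.map_reverse]

-- ===== VERDICT (by name: the statement is the Claim_ definition above) =====
theorem mlu_calc_components_spec : Claim_equal_mlu_calc_components := by
  intro sents _
  unfold Spec_mlu_calc_components
  exact main_eq sents
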